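-- pv_equiv track=rewrite | github.com/UjanGuin/ZYLO-UNIFIED | ZYlO_RiG0R.py | is_proof_only
-- ===== SOURCE A (Python) =====
-- def is_proof_only(text: str) -> bool:
--     if not isinstance(text, str):
--         return False
--
--     # Indicators of proof-style reasoning
--     keywords = [
--         "there exists", "suppose", "assume", "by contradiction",
--         "by mean value theorem", "hence", "therefore", "let"
--     ]
--
--     return any(k in text.lower() for k in keywords)
-- ===== SOURCE B (Python) =====
-- KEYWORDS = ("there exists", "suppose", "assume", "by contradiction",
--             "by mean value theorem", "hence", "therefore", "let")
--
-- def is_proof_only(text: str) -> bool: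
--     if not isinstance(text, str):
--         return False
--     t = text.lower()
--     for i in range(len(t)):
--         if any(t.startswith(k, i) for k in KEYWORDS):
--             return True
--     return False
-- ===== Notes on version B (the rewrite author's own statement) =====
-- stated objective: alternative
-- what changed: Replaces eight independent per-keyword substring membership scans with a single left-to-right pass that at each position tests whether any keyword starts there.
import Mathlib
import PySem

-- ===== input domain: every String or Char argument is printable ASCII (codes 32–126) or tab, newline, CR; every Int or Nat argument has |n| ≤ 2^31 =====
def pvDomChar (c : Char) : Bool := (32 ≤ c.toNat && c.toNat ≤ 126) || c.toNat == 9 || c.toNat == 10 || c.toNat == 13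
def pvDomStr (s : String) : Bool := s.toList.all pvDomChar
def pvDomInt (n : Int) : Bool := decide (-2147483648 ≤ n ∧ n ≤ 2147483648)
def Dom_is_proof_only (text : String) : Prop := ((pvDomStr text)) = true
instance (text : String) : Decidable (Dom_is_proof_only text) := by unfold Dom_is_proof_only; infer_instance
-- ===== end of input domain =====

-- B replaces A's eight independent substring scans by one left-to-right pass testing each
-- position for a keyword start (objective: alternative; the isinstance guard is vacuous here).

-- ===== PORT A =====
def pvKeywords_is_proof_only : List String :=
  ["there exists", "suppose", "assume", "by contradiction",
   "by mean value theorem", "hence", "therefore", "let"]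

def is_proof_only (text : String) : Bool :=
  pvKeywords_is_proof_only.any (fun k => PySem.Str.isIn k (PySem.Str.lower text))

-- ===== PORT B =====
def pvKeywordsB_is_proof_only : List (List Char) :=
  [("there exists" : String).toList, ("suppose" : String).toList, ("assume" : String).toList,
   ("by contradiction" : String).toList, ("by mean value theorem" : String).toList,
   ("hence" : String).toList, ("therefore" : String).toList, ("let" : String).toList]

-- the 'for i in range(len(t))' loop of Source B: at each position (= suffix) test every keyword start
def pvScan_is_proof_only (kws : List (List Char)) : List Char → Bool
  | [] => false
  | c :: rest =>
    (kws.any (fun k => PySem.Chars.startswith (c :: rest) k)) || pvScan_is_proof_only kws rest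

def is_proof_only_alt (text : String) : Bool :=
  pvScan_is_proof_only pvKeywordsB_is_proof_only (PySem.Chars.lower text.toList)

-- ===== PRECONDITION & SPEC =====
def Spec_is_proof_only (text : String) (out : Bool) : Prop := out = is_proof_only_alt text
instance (text : String) (out : Bool) : Decidable (Spec_is_proof_only text out) := by unfold Spec_is_proof_only; infer_instance

-- ===== CLAIM (what is proved, stated in full; the proofs are below) =====
def Claim_equal_is_proof_only : Prop := ∀ (text : String), Dom_is_proof_only text → Spec_is_proof_only text (is_proof_only text)

-- ===== LEMMAS AND PROOFS =====

-- the position scan finds a keyword iff some keyword occurs as an infix (keywords nonempty)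
theorem pvScan_iff (kws : List (List Char)) (h : ∀ k ∈ kws, k ≠ []) (s : List Char) :
    pvScan_is_proof_only kws s = true ↔ ∃ k ∈ kws, k <:+: s := by
  induction s with
  | nil =>
    simp only [pvScan_is_proof_only]
    constructor
    · intro hf; exact absurd hf (by simp)
    · rintro ⟨k, hk, hinf⟩
      exact absurd (List.eq_nil_of_infix_nil hinf) (h k hk)
  | cons c rest ih =>
    simp only [pvScan_is_proof_only, Bool.or_eq_true, List.any_eq_true, ih,
      PySem.Chars.startswith_iff]
    constructor
    · rintro (⟨k, hk, hp⟩ | ⟨k, hk, hinf⟩)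
      · exact ⟨k, hk, hp.isInfix⟩
      · exact ⟨k, hk, List.infix_cons hinf⟩
    · rintro ⟨k, hk, hinf⟩
      rcases List.infix_cons_iff.mp hinf with hp | hinf'
      · exact Or.inl ⟨k, hk, hp⟩
      · exact Or.inr ⟨k, hk, hinf'⟩

-- ===== VERDICT (by name: the statement is the Claim_ definition above) =====
theorem is_proof_only_spec : Claim_equal_is_proof_only := by
  intro text _
  unfold Spec_is_proof_only is_proof_only is_proof_only_alt
  have hne : ∀ k ∈ pvKeywordsB_is_proof_only, k ≠ [] := by decide
  have hmap : pvKeywordsB_is_proof_only = pvKeywords_is_proof_only.map String.toList := by rfl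
  rw [Bool.eq_iff_iff, List.any_eq_true, pvScan_iff _ hne, hmap]
  simp only [List.mem_map, PySem.Str.isIn_iff_infix, PySem.Str.toList_lower]
  constructor
  · rintro ⟨k, hk, hinf⟩; exact ⟨k.toList, ⟨k, hk, rfl⟩, hinf⟩
  · rintro ⟨_, ⟨k, hk, rfl⟩, hinf⟩; exact ⟨k, hk, hinf⟩
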